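-- pv_equiv track=rewrite | github.com/MinhSkyDev/RookPolyminalSolver | RookPolynomial.py | rookPoly
-- ===== SOURCE A (Python) =====
-- def countCells(board,sizeMatrix):
--     count = 0
--     for i in range(sizeMatrix):
--         for j in range(sizeMatrix):
--             if(board[i][j] == False):
--                 count +=1
--     return count
--
-- def findFirst(board,sizeMatrix):
--     for i in range(0,sizeMatrix):
--         for j in range(0,sizeMatrix):
--             if(board[i][j] == False):
--                 return (i,j)
--
-- def delColAndRow(board,sizeMatrix,first):
--     newBoard = []
--     for i in range(0,sizeMatrix):
--         newBoard_col = []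
--         for j in range(0,sizeMatrix):
--             newBoard_col.append(board[i][j])
--         newBoard.append(newBoard_col)
--
--     col_del = first[1]
--     row_del = first[0]
--
--     ##del col
--     for i in range(0,sizeMatrix):
--         newBoard[i][col_del] = True
--     for i in range(0,sizeMatrix):
--         newBoard[row_del][i] = True
--     return newBoard
--
-- def delCell(board,sizeMatrix,first):
--     newBoard = []
--     for i in range(0,sizeMatrix):
--         newBoard_col = []
--         for j in range(0,sizeMatrix):
--             newBoard_col.append(board[i][j])
--         newBoard.append(newBoard_col)
--     col_del = first[1]
--     row_del = first[0]
--     newBoard[row_del][col_del] = True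
--     return newBoard
--
-- def add2Vector(subPoly_1,subPoly_2):
--     add = []
--     minSize = min(len(subPoly_1),len(subPoly_2))
--     for i in range(0,minSize):
--         current = subPoly_1[i] + subPoly_2[i]
--         add.append(current)
--
--     if(minSize<len(subPoly_1)):
--         for i in range(minSize,len(subPoly_1)):
--             add.append(subPoly_1[i])
--     if(minSize < len(subPoly_2)):
--         for i in range(minSize,len(subPoly_2)):
--             add.append(subPoly_2[i])
--
--     return add
--
-- def rookPoly(board,sizeMatrix):
--     poly = []
--     poly.append(1)
--     countCell = countCells(board,sizeMatrix)
--     if(countCell == 0):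
--         return poly
--     elif(countCell == 1):
--         poly.append(1)
--         return poly
--     else:
--         first = findFirst(board,sizeMatrix)
--         board_sub1 = delColAndRow(board,sizeMatrix,first)
--         board_sub2 = delCell(board,sizeMatrix,first)
--
--         subPoly_1 = rookPoly(board_sub1,sizeMatrix)
--         subPoly_2 = rookPoly(board_sub2,sizeMatrix)
--         subPoly_1.insert(0,0)
--         poly = add2Vector(subPoly_1,subPoly_2)
--         return poly
-- ===== SOURCE B (Python) =====
-- def vadd(a, b):
--     if len(a) < len(b):
--         a, b = b, a
--     return [x + (b[i] if i < len(b) else 0) for i, x in enumerate(a)]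
--
-- def rookPoly(board, sizeMatrix):
--     n = max(sizeMatrix, 0)
--     total = []
--     stack = [(board, 0)]
--     while stack:
--         b, d = stack.pop()
--         free = [(i, j) for i in range(n) for j in range(n) if not b[i][j]]
--         if len(free) == 0:
--             total = vadd(total, [0] * d + [1])
--         elif len(free) == 1:
--             total = vadd(total, [0] * d + [1, 1])
--         else:
--             r, c = free[0]
--             without = [[True if (i == r or j == c) else b[i][j] for j in range(n)] for i in range(n)]
--             removed = [[True if (i == r and j == c) else b[i][j] for j in range(n)] for i in range(n)]
--             stack.append((without, d + 1))
--             stack.append((removed, d))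
--     return total
-- ===== Notes on version B (the rewrite author's own statement) =====
-- stated objective: alternative
-- what changed: A's recursive single-cell expansion (recurse on delete-cell and delete-row-and-column, combine shifted sub-polynomials with add2Vector) is replaced by an iterative explicit worklist: a stack of (board, shift) pairs is popped in a loop and each leaf contributes its shifted base vector directly into one running padded-vector accumulator.
import Mathlib
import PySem

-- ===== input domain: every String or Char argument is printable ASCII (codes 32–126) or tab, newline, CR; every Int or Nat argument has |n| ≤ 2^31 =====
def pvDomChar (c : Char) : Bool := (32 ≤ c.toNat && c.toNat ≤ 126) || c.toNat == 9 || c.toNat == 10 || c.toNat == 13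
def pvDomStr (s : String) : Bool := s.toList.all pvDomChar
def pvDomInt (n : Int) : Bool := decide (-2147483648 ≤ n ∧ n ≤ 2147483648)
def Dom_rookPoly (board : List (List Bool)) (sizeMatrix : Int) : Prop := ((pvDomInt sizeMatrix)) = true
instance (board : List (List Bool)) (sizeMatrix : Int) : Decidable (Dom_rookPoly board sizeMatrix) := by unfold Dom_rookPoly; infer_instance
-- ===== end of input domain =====

-- B replaces A's recursive single-cell expansion by an explicit worklist (a stack of
-- (board, shift) pairs) popped in a loop into one running padded-vector accumulator:
-- an alternative decomposition of the same computation, proved to return the same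
-- coefficient vector (return value only; neither program mutates its input).
-- Both recursions are totalized with a fuel argument that provably suffices
-- (rookPolyAux_congr / stack_eq below); the fuel never runs out on any input.

-- ===== PORT A =====
-- shared cell read board[i][j]; the default `true` is never reached on inputs
-- admitted by Pre_ (every index the Python evaluates is then in range)
def getCell (b : List (List Bool)) (i j : Nat) : Bool := (b.getD i []).getD j true

-- range(sizeMatrix) is traversed as List.range sizeMatrix.toNat: exact, since for
-- sizeMatrix ≤ 0 Python's range is empty too
def countCells (b : List (List Bool)) (n : Nat) : Nat :=
  (List.range n).foldl
    (fun c i => (List.range n).foldl (fun c j => if getCell b i j = false then c + 1 else c) c) 0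

def findFirst (b : List (List Bool)) (n : Nat) : Option (Nat × Nat) :=
  (List.range n).findSome?
    (fun i => (List.range n).findSome? (fun j => if getCell b i j = false then some (i, j) else none))

def copyBoard (b : List (List Bool)) (n : Nat) : List (List Bool) :=
  (List.range n).map (fun i => (List.range n).map (fun j => getCell b i j))

def delColAndRow (b : List (List Bool)) (n : Nat) (first : Nat × Nat) : List (List Bool) :=
  (((copyBoard b n).map (fun row => row.set first.2 true)).modify first.1
    (fun row => row.map (fun _ => true)))

def delCell (b : List (List Bool)) (n : Nat) (first : Nat × Nat) : List (List Bool) :=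
  (copyBoard b n).modify first.1 (fun row => row.set first.2 true)

def add2Vector (a b : List Int) : List Int :=
  let m := min a.length b.length
  ((List.range m).map (fun i => a.getD i 0 + b.getD i 0)) ++ a.drop m ++ b.drop m

-- fuel = countCells board n always suffices (each recursive call strictly lowers
-- the free-cell count; countCells = 0 is answered identically by both patterns)
def rookPolyAux : Nat → List (List Bool) → Nat → List Int
  | 0, _, _ => [1]
  | fuel + 1, board, n =>
    if countCells board n = 0 then [1]
    else if countCells board n = 1 then [1, 1]
    else
      match findFirst board n with
      | none => [1]   -- unreachable: countCells ≥ 2 guarantees findFirst finds a cell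
      | some first =>
        add2Vector (0 :: rookPolyAux fuel (delColAndRow board n first) n)
          (rookPolyAux fuel (delCell board n first) n)

def rookPoly (board : List (List Bool)) (sizeMatrix : Int) : List Int :=
  rookPolyAux (countCells board sizeMatrix.toNat) board sizeMatrix.toNat

-- ===== PORT B =====
def vaddGo (a b : List Int) : List Int :=
  (List.range a.length).map (fun i => a.getD i 0 + b.getD i 0)

def vadd (a b : List Int) : List Int :=
  if a.length < b.length then vaddGo b a else vaddGo a b

def freeList (b : List (List Bool)) (n : Nat) : List (Nat × Nat) :=
  (List.range n).flatMap
    (fun i => (List.range n).filterMap (fun j => if getCell b i j = false then some (i, j) else none))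

def forbidRowCol (b : List (List Bool)) (n r c : Nat) : List (List Bool) :=
  (List.range n).map (fun i => (List.range n).map (fun j => if i = r ∨ j = c then true else getCell b i j))

def forbidCell (b : List (List Bool)) (n r c : Nat) : List (List Bool) :=
  (List.range n).map (fun i => (List.range n).map (fun j => if i = r ∧ j = c then true else getCell b i j))

-- fuel = 3 ^ countCells of the initial board bounds the stack measure throughout
-- (stack_eq below); it never runs out
def rookPolyStack : Nat → Nat → List (List (List Bool) × Nat) → List Int → List Int
  | _, _, [], total => total
  | 0, _, _ :: _, total => total   -- unreachable under the stated fuel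
  | fuel + 1, n, (b, d) :: rest, total =>
    match freeList b n with
    | [] => rookPolyStack fuel n rest (vadd total (List.replicate d 0 ++ [1]))
    | [_] => rookPolyStack fuel n rest (vadd total (List.replicate d 0 ++ [1, 1]))
    | (r, c) :: _ :: _ =>
      rookPolyStack fuel n (((forbidCell b n r c), d) :: ((forbidRowCol b n r c), d + 1) :: rest) total

def rookPoly_alt (board : List (List Bool)) (sizeMatrix : Int) : List Int :=
  rookPolyStack (3 ^ (freeList board sizeMatrix.toNat).length) sizeMatrix.toNat [(board, 0)] []

-- ===== PRECONDITION & SPEC =====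
-- Pre_ excludes exactly the inputs on which the Python A raises IndexError: boards
-- with fewer than sizeMatrix rows, or one of the first sizeMatrix rows shorter than
-- sizeMatrix.
def Pre_rookPoly (board : List (List Bool)) (sizeMatrix : Int) : Prop :=
  sizeMatrix ≤ board.length ∧ ∀ row ∈ board.take sizeMatrix.toNat, sizeMatrix ≤ row.length

instance (board : List (List Bool)) (sizeMatrix : Int) : Decidable (Pre_rookPoly board sizeMatrix) := by
  unfold Pre_rookPoly; infer_instance

def pvWitness_rookPoly : List (List Bool) × Int :=
  ([[false, true], [true, false]], 2)

def Spec_rookPoly (board : List (List Bool)) (sizeMatrix : Int) (out : List Int) : Prop := out = rookPoly_alt board sizeMatrix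
instance (board : List (List Bool)) (sizeMatrix : Int) (out : List Int) : Decidable (Spec_rookPoly board sizeMatrix out) := by unfold Spec_rookPoly; infer_instance

-- ===== CLAIM (what is proved, stated in full; the proofs are below) =====
def Claim_equal_rookPoly : Prop := ∀ (board : List (List Bool)) (sizeMatrix : Int), Dom_rookPoly board sizeMatrix → Pre_rookPoly board sizeMatrix → Spec_rookPoly board sizeMatrix (rookPoly board sizeMatrix)

-- ===== LEMMAS AND PROOFS =====

def cellInd (b : List (List Bool)) (i j : Nat) : Nat := if getCell b i j = false then 1 else 0

def stackMeasure (n : Nat) (stack : List (List (List Bool) × Nat)) : Nat :=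
  (stack.map (fun p => 3 ^ countCells p.1 n)).sum

theorem foldl_if_count {α} (p : α → Prop) [DecidablePred p] (l : List α) (c : Nat) :
    l.foldl (fun c j => if p j then c + 1 else c) c
      = c + (l.map (fun j => if p j then 1 else 0)).sum := by
  induction l generalizing c with
  | nil => simp
  | cons a t ih => simp only [List.foldl_cons, List.map_cons, List.sum_cons, ih]; split_ifs <;> omega

theorem foldl_add_of {α} (g : α → Nat) (l : List α) (F : α → Nat → Nat)
    (h : ∀ c i, F i c = c + g i) (c : Nat) :
    l.foldl (fun c i => F i c) c = c + (l.map g).sum := by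
  induction l generalizing c with
  | nil => simp
  | cons a t ih => rw [List.foldl_cons, ih, h]; simp only [List.map_cons, List.sum_cons]; omega

theorem sum_map_range (f : Nat → Nat) (n : Nat) :
    ((List.range n).map f).sum = ∑ i ∈ Finset.range n, f i := by
  induction n with
  | zero => simp
  | succ m ih => rw [List.range_succ, List.map_append, List.sum_append, Finset.sum_range_succ, ih]; simp

theorem getCell_mk (f : Nat → Nat → Bool) {n i j : Nat} (hi : i < n) (hj : j < n) :
    getCell ((List.range n).map (fun i => (List.range n).map (fun j => f i j))) i j = f i j := by
  simp [getCell, List.getD_eq_getElem?_getD, List.getElem?_map, List.getElem?_range, hi, hj]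

theorem countCells_eq_sum (b : List (List Bool)) (n : Nat) :
    countCells b n = ∑ p ∈ Finset.range n ×ˢ Finset.range n, cellInd b p.1 p.2 := by
  unfold countCells
  rw [foldl_add_of (fun i => ((List.range n).map (fun j => cellInd b i j)).sum) _ _
    (fun c i => foldl_if_count _ _ c) 0]
  rw [Finset.sum_product']
  simp only [Nat.zero_add]
  rw [sum_map_range]
  exact Finset.sum_congr rfl (fun i _ => sum_map_range _ n)

theorem filterMap_if_length {α β} (p : α → Prop) [DecidablePred p] (g : α → β) (l : List α) :
    (l.filterMap (fun j => if p j then some (g j) else none)).length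
      = (l.map (fun j => if p j then 1 else 0)).sum := by
  induction l with
  | nil => simp
  | cons a t ih => by_cases h : p a <;> simp [List.filterMap_cons, h, ih] <;> omega

theorem freeLen_eq_count (b : List (List Bool)) (n : Nat) :
    (freeList b n).length = countCells b n := by
  unfold freeList
  rw [List.length_flatMap, countCells_eq_sum, Finset.sum_product']
  have key : ∀ i, ((List.range n).filterMap (fun j => if getCell b i j = false then some (i, j) else none)).length
      = ∑ j ∈ Finset.range n, cellInd b i j := by
    intro i
    rw [filterMap_if_length (fun j => getCell b i j = false) (fun j => (i, j))]
    exact sum_map_range _ n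
  rw [List.map_congr_left (fun i _ => key i), sum_map_range]

theorem count_forbidCell {b : List (List Bool)} {n r c : Nat}
    (hfree : getCell b r c = false) (hr : r < n) (hc : c < n) :
    countCells (forbidCell b n r c) n < countCells b n := by
  rw [countCells_eq_sum, countCells_eq_sum]
  apply Finset.sum_lt_sum
  · rintro ⟨i, j⟩ hp
    rw [Finset.mem_product, Finset.mem_range, Finset.mem_range] at hp
    unfold cellInd forbidCell
    rw [getCell_mk _ hp.1 hp.2]
    split_ifs <;> simp_all
  · refine ⟨(r, c), by simp [Finset.mem_product, hr, hc], ?_⟩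
    unfold cellInd forbidCell
    rw [getCell_mk _ hr hc]
    simp [hfree]

theorem count_forbidRowCol {b : List (List Bool)} {n r c : Nat}
    (hfree : getCell b r c = false) (hr : r < n) (hc : c < n) :
    countCells (forbidRowCol b n r c) n < countCells b n := by
  rw [countCells_eq_sum, countCells_eq_sum]
  apply Finset.sum_lt_sum
  · rintro ⟨i, j⟩ hp
    rw [Finset.mem_product, Finset.mem_range, Finset.mem_range] at hp
    unfold cellInd forbidRowCol
    rw [getCell_mk _ hp.1 hp.2]
    split_ifs <;> simp_all
  · refine ⟨(r, c), by simp [Finset.mem_product, hr, hc], ?_⟩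
    unfold cellInd forbidRowCol
    rw [getCell_mk _ hr hc]
    simp [hfree]

theorem findSome?_eq_head?_filterMap {α β} (f : α → Option β) (l : List α) :
    l.findSome? f = (l.filterMap f).head? := by
  induction l with
  | nil => simp
  | cons a t ih =>
    cases h : f a with
    | none => simp only [List.findSome?_cons, List.filterMap_cons, h]; exact ih
    | some v => simp only [List.findSome?_cons, List.filterMap_cons, h, List.head?_cons]

theorem findSome?_head?_flatMap {α β} (g : α → List β) (l : List α) :
    l.findSome? (fun i => (g i).head?) = (l.flatMap g).head? := by
  induction l with
  | nil => simp
  | cons a t ih => cases h : (g a).head? <;> simp [List.findSome?_cons, List.head?_append, h, ih]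

theorem findFirst_eq_head (b : List (List Bool)) (n : Nat) :
    findFirst b n = (freeList b n).head? := by
  unfold findFirst freeList
  have hfun : (fun i => (List.range n).findSome?
        (fun j => if getCell b i j = false then some (i, j) else none))
      = (fun i => ((List.range n).filterMap
        (fun j => if getCell b i j = false then some (i, j) else none)).head?) :=
    funext fun i => findSome?_eq_head?_filterMap _ _
  rw [hfun, findSome?_head?_flatMap]

theorem mem_freeList {b : List (List Bool)} {n : Nat} {p : Nat × Nat}
    (h : p ∈ freeList b n) : getCell b p.1 p.2 = false ∧ p.1 < n ∧ p.2 < n := by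
  simp only [freeList, List.mem_flatMap, List.mem_filterMap, List.mem_range] at h
  obtain ⟨i, hi, j, hj, hij⟩ := h
  by_cases hc : getCell b i j = false
  · simp only [hc, if_pos] at hij
    cases hij
    exact ⟨hc, hi, hj⟩
  · simp [hc] at hij

theorem getCell_eq (b : List (List Bool)) (i j : Nat) :
    getCell b i j = ((b[i]?.getD [])[j]?).getD true := by
  rw [getCell, List.getD_eq_getElem?_getD, List.getD_eq_getElem?_getD]

theorem getCell_delCell {b : List (List Bool)} {n r c i j : Nat}
    (hi : i < n) (hj : j < n) :
    getCell (delCell b n (r, c)) i j = if r = i ∧ c = j then true else getCell b i j := by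
  rw [getCell_eq]
  unfold delCell copyBoard
  rw [List.getElem?_modify, List.getElem?_map, List.getElem?_range hi]
  by_cases hir : r = i
  · by_cases hcj : c = j
    · simp [hir, hcj, List.getElem?_set, hj]
    · simp [hir, hcj, List.getElem?_set, List.getElem?_map, List.getElem?_range hj]
  · simp [hir, List.getElem?_map, List.getElem?_range hj]

theorem getCell_delColAndRow {b : List (List Bool)} {n r c i j : Nat}
    (hi : i < n) (hj : j < n) :
    getCell (delColAndRow b n (r, c)) i j = if r = i ∨ c = j then true else getCell b i j := by
  rw [getCell_eq]
  unfold delColAndRow copyBoard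
  rw [List.getElem?_modify, List.getElem?_map, List.getElem?_map, List.getElem?_range hi]
  by_cases hir : r = i
  · simp [hir, List.getElem?_map, List.getElem?_range hj]
  · by_cases hcj : c = j
    · simp [hir, hcj, List.getElem?_set, List.getElem?_map, List.getElem?_range hj, hj]
    · simp [hir, hcj, List.getElem?_set, List.getElem?_map, List.getElem?_range hj]

theorem findFirst_spec {b : List (List Bool)} {n : Nat} {r c : Nat}
    (h : findFirst b n = some (r, c)) : getCell b r c = false ∧ r < n ∧ c < n := by
  rw [findFirst_eq_head] at h
  exact mem_freeList (List.mem_of_mem_head? h)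

theorem count_delColAndRow {b : List (List Bool)} {n r c : Nat}
    (h : findFirst b n = some (r, c)) :
    countCells (delColAndRow b n (r, c)) n < countCells b n := by
  obtain ⟨hf, hr, hc⟩ := findFirst_spec h
  rw [countCells_eq_sum, countCells_eq_sum]
  apply Finset.sum_lt_sum
  · rintro ⟨i, j⟩ hp
    rw [Finset.mem_product, Finset.mem_range, Finset.mem_range] at hp
    unfold cellInd
    rw [getCell_delColAndRow hp.1 hp.2]
    split_ifs <;> simp_all
  · refine ⟨(r, c), by simp [Finset.mem_product, hr, hc], ?_⟩
    unfold cellInd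
    rw [getCell_delColAndRow hr hc]
    simp [hf]

theorem count_delCell {b : List (List Bool)} {n r c : Nat}
    (h : findFirst b n = some (r, c)) :
    countCells (delCell b n (r, c)) n < countCells b n := by
  obtain ⟨hf, hr, hc⟩ := findFirst_spec h
  rw [countCells_eq_sum, countCells_eq_sum]
  apply Finset.sum_lt_sum
  · rintro ⟨i, j⟩ hp
    rw [Finset.mem_product, Finset.mem_range, Finset.mem_range] at hp
    unfold cellInd
    rw [getCell_delCell hp.1 hp.2]
    split_ifs <;> simp_all
  · refine ⟨(r, c), by simp [Finset.mem_product, hr, hc], ?_⟩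
    unfold cellInd
    rw [getCell_delCell hr hc]
    simp [hf]

theorem delColAndRow_eq {b : List (List Bool)} {n r c : Nat} (hr : r < n) (hc : c < n) :
    delColAndRow b n (r, c) = forbidRowCol b n r c := by
  unfold delColAndRow forbidRowCol copyBoard
  apply List.ext_getElem (by simp)
  intro i h1 h2
  simp only [List.length_modify, List.length_map, List.length_range] at h1 h2
  rw [List.getElem_modify]
  apply List.ext_getElem (by split <;> simp)
  intro j g1 g2
  simp only [List.getElem_map, List.getElem_range] at *
  split
  · next hir =>
    simp only [List.length_map, List.length_set] at g1
    simp only [List.getElem_map, List.getElem_range, ← hir]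
    simp
  · next hir =>
    rw [List.getElem_set]
    simp only [List.getElem_map, List.getElem_range]
    have hir' : ¬ (i = r) := fun h => hir h.symm
    by_cases hjc : j = c
    · simp [hjc]
    · have hcj : ¬ (c = j) := fun h => hjc h.symm
      simp [hcj, hir', hjc]

theorem delCell_eq {b : List (List Bool)} {n r c : Nat} (hr : r < n) (hc : c < n) :
    delCell b n (r, c) = forbidCell b n r c := by
  unfold delCell forbidCell copyBoard
  apply List.ext_getElem (by simp)
  intro i h1 h2
  simp only [List.length_modify, List.length_map, List.length_range] at h1 h2
  rw [List.getElem_modify]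
  apply List.ext_getElem (by split <;> simp)
  intro j g1 g2
  simp only [List.length_map, List.length_range] at g2
  split
  · next hir =>
    rw [List.getElem_set]
    simp only [List.getElem_map, List.getElem_range, ← hir]
    by_cases hjc : j = c
    · simp [hjc]
    · have hcj : ¬ (c = j) := fun h => hjc h.symm
      simp [hcj, hjc]
  · next hir =>
    simp only [List.getElem_map, List.getElem_range]
    have : ¬ (i = r) := fun h => hir h.symm
    simp [this]

theorem eq_of_getD {x y : List Int} (hl : x.length = y.length)
    (h : ∀ i, x.getD i 0 = y.getD i 0) : x = y := by
  apply List.ext_getElem hl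
  intro i h1 h2
  have := h i
  rwa [List.getD_eq_getElem _ _ h1, List.getD_eq_getElem _ _ h2] at this

theorem getD_out {x : List Int} {i : Nat} (h : x.length ≤ i) : x.getD i 0 = 0 := by
  simp [List.getD_eq_getElem?_getD, List.getElem?_eq_none h]

theorem getD_append (x y : List Int) (i : Nat) :
    (x ++ y).getD i 0 = if i < x.length then x.getD i 0 else y.getD (i - x.length) 0 := by
  by_cases h : i < x.length
  · rw [if_pos h, List.getD_eq_getElem _ _ (by simp; omega), List.getD_eq_getElem _ _ h]
    exact List.getElem_append_left h
  · rw [if_neg h]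
    by_cases h2 : i < x.length + y.length
    · rw [List.getD_eq_getElem _ _ (by simp; omega), List.getD_eq_getElem _ _ (by omega)]
      exact List.getElem_append_right (by omega)
    · rw [getD_out (by simp; omega), getD_out (by omega)]

theorem getD_drop (a : List Int) (m k : Nat) : (a.drop m).getD k 0 = a.getD (m + k) 0 := by
  by_cases h : m + k < a.length
  · rw [List.getD_eq_getElem _ _ (by simp; omega), List.getD_eq_getElem _ _ h, List.getElem_drop]
  · rw [getD_out (by simp; omega), getD_out (by omega)]

theorem length_vaddGo (a b : List Int) : (vaddGo a b).length = a.length := by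
  simp [vaddGo]

theorem getD_vaddGo {a b : List Int} (h : b.length ≤ a.length) (i : Nat) :
    (vaddGo a b).getD i 0 = a.getD i 0 + b.getD i 0 := by
  by_cases hi : i < a.length
  · rw [List.getD_eq_getElem _ _ (by simpa [length_vaddGo] using hi)]
    simp [vaddGo, hi]
  · push_neg at hi
    rw [getD_out (by simpa [length_vaddGo] using hi), getD_out hi, getD_out (le_trans h hi)]
    simp

theorem length_vadd (a b : List Int) : (vadd a b).length = max a.length b.length := by
  unfold vadd; split <;> simp [length_vaddGo] <;> omega

theorem getD_vadd (a b : List Int) (i : Nat) :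
    (vadd a b).getD i 0 = a.getD i 0 + b.getD i 0 := by
  unfold vadd; split
  · rw [getD_vaddGo (by omega)]; ring
  · rw [getD_vaddGo (by omega)]

theorem add2Vector_eq_vadd (a b : List Int) : add2Vector a b = vadd a b := by
  apply eq_of_getD
  · simp only [add2Vector, List.length_append, List.length_map, List.length_range,
      List.length_drop, length_vadd]
    omega
  · intro i
    simp only [add2Vector, List.append_assoc, getD_append, List.length_map, List.length_range,
      List.length_drop, getD_drop, getD_vadd]
    by_cases h1 : i < min a.length b.length
    · rw [if_pos h1, List.getD_eq_getElem _ _ (by simp; omega)]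
      simp [h1]
    · rw [if_neg h1]
      by_cases h2 : i - min a.length b.length < a.length - min a.length b.length
      · rw [if_pos h2]
        have hbl : b.length ≤ i := by omega
        rw [getD_out hbl]
        have : min a.length b.length + (i - min a.length b.length) = i := by omega
        rw [this]
        ring
      · rw [if_neg h2]
        have hal : a.length ≤ i := by omega
        rw [getD_out hal]
        by_cases hab : a.length ≤ b.length
        · have : min a.length b.length + (i - min a.length b.length - (a.length - min a.length b.length)) = i := by
            omega
          rw [this]
          ring
        · rw [getD_out (by omega : b.length ≤ min a.length b.length
              + (i - min a.length b.length - (a.length - min a.length b.length))),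
            getD_out (by omega : b.length ≤ i)]
          ring

theorem vadd_comm (a b : List Int) : vadd a b = vadd b a := by
  apply eq_of_getD (by rw [length_vadd, length_vadd]; omega)
  intro i; rw [getD_vadd, getD_vadd]; ring

theorem vadd_assoc' (a b c : List Int) : vadd (vadd a b) c = vadd a (vadd b c) := by
  apply eq_of_getD (by simp only [length_vadd]; omega)
  intro i; simp only [getD_vadd]; ring

theorem vadd_nil (a : List Int) : vadd [] a = a := by
  apply eq_of_getD (by rw [length_vadd]; simp)
  intro i; rw [getD_vadd]; simp

theorem getD_replicate' (d i : Nat) : (List.replicate d (0 : Int)).getD i 0 = 0 := by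
  by_cases h : i < d
  · rw [List.getD_eq_getElem _ _ (by simpa using h)]; simp
  · exact getD_out (by simpa using Nat.le_of_not_lt h)

theorem vadd_shift (d : Nat) (a b : List Int) :
    vadd (List.replicate d 0 ++ a) (List.replicate d 0 ++ b) =
      List.replicate d 0 ++ vadd a b := by
  apply eq_of_getD (by simp only [length_vadd, List.length_append, List.length_replicate]; omega)
  intro i
  simp only [getD_vadd, getD_append, List.length_replicate, getD_replicate']
  split <;> simp [getD_vadd]

theorem rep_succ_shift (d : Nat) (s : List Int) :
    List.replicate (d + 1) (0 : Int) ++ s = List.replicate d 0 ++ (0 :: s) := by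
  rw [List.replicate_succ', List.append_assoc]
  rfl


theorem findFirst_pos {b : List (List Bool)} {n : Nat} (h : countCells b n ≠ 0) :
    ∃ r c, findFirst b n = some (r, c) := by
  rw [findFirst_eq_head]
  cases hfl : freeList b n with
  | nil => exact absurd (by rw [← freeLen_eq_count, hfl]; rfl) h
  | cons p t => exact ⟨p.1, p.2, by simp⟩

theorem rookPolyAux_count0 {b : List (List Bool)} {n : Nat} (h : countCells b n = 0) :
    ∀ f, rookPolyAux f b n = [1] := by
  intro f
  cases f with
  | zero => rfl
  | succ f => rw [rookPolyAux, if_pos h]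

theorem rookPolyAux_count1 {b : List (List Bool)} {n : Nat} (h : countCells b n = 1)
    (f : Nat) : rookPolyAux (f + 1) b n = [1, 1] := by
  rw [rookPolyAux, if_neg (by omega), if_pos h]

theorem rookPolyAux_branch {b : List (List Bool)} {n r c : Nat} (f : Nat)
    (h0 : countCells b n ≠ 0) (h1 : countCells b n ≠ 1)
    (hf : findFirst b n = some (r, c)) :
    rookPolyAux (f + 1) b n =
      add2Vector (0 :: rookPolyAux f (delColAndRow b n (r, c)) n)
        (rookPolyAux f (delCell b n (r, c)) n) := by
  rw [rookPolyAux, if_neg h0, if_neg h1]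
  split
  · next heq => rw [hf] at heq; cases heq
  · next p heq => rw [hf] at heq; cases heq; rfl

theorem rookPolyAux_congr {b : List (List Bool)} {n : Nat} :
    ∀ f g, countCells b n ≤ f → countCells b n ≤ g →
      rookPolyAux f b n = rookPolyAux g b n := by
  suffices H : ∀ f, ∀ b : List (List Bool), ∀ g, countCells b n ≤ f → countCells b n ≤ g →
      rookPolyAux f b n = rookPolyAux g b n from fun f g hf hg => H f b g hf hg
  intro f
  induction f with
  | zero =>
    intro b g hf _
    rw [rookPolyAux_count0 (by omega), rookPolyAux_count0 (by omega)]
  | succ f ih =>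
    intro b g hf hg
    by_cases h0 : countCells b n = 0
    · rw [rookPolyAux_count0 h0, rookPolyAux_count0 h0]
    · obtain ⟨g', rfl⟩ : ∃ g', g = g' + 1 := ⟨g - 1, by omega⟩
      by_cases h1 : countCells b n = 1
      · rw [rookPolyAux_count1 h1, rookPolyAux_count1 h1]
      · obtain ⟨r, c, hfind⟩ := findFirst_pos h0
        rw [rookPolyAux_branch f h0 h1 hfind, rookPolyAux_branch g' h0 h1 hfind]
        have hc1 : countCells (delColAndRow b n (r, c)) n < countCells b n :=
          count_delColAndRow hfind
        have hc2 : countCells (delCell b n (r, c)) n < countCells b n :=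
          count_delCell hfind
        rw [ih (delColAndRow b n (r, c)) g' (by omega) (by omega),
          ih (delCell b n (r, c)) g' (by omega) (by omega)]

theorem stack_step_nil {b : List (List Bool)} {n : Nat} (fuel d : Nat)
    (rest : List (List (List Bool) × Nat)) (total : List Int)
    (hfl : freeList b n = []) :
    rookPolyStack (fuel + 1) n ((b, d) :: rest) total =
      rookPolyStack fuel n rest (vadd total (List.replicate d 0 ++ [1])) := by
  rw [rookPolyStack, hfl]

theorem stack_step_one {b : List (List Bool)} {n : Nat} {q : Nat × Nat} (fuel d : Nat)
    (rest : List (List (List Bool) × Nat)) (total : List Int)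
    (hfl : freeList b n = [q]) :
    rookPolyStack (fuel + 1) n ((b, d) :: rest) total =
      rookPolyStack fuel n rest (vadd total (List.replicate d 0 ++ [1, 1])) := by
  rw [rookPolyStack, hfl]

theorem stack_step_branch {b : List (List Bool)} {n r c : Nat} {q : Nat × Nat}
    {t : List (Nat × Nat)} (fuel d : Nat)
    (rest : List (List (List Bool) × Nat)) (total : List Int)
    (hfl : freeList b n = (r, c) :: q :: t) :
    rookPolyStack (fuel + 1) n ((b, d) :: rest) total =
      rookPolyStack fuel n (((forbidCell b n r c), d) :: ((forbidRowCol b n r c), d + 1) :: rest) total := by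
  rw [rookPolyStack, hfl]

theorem stack_eq (n : Nat) :
    ∀ fuel stack total, stackMeasure n stack ≤ fuel →
      rookPolyStack fuel n stack total =
        stack.foldl
          (fun acc p => vadd acc (List.replicate p.2 0 ++ rookPolyAux (countCells p.1 n) p.1 n))
          total := by
  intro fuel
  induction fuel with
  | zero =>
    intro stack total hm
    cases stack with
    | nil => rfl
    | cons p rest =>
      exfalso
      have h3 : 0 < 3 ^ countCells p.1 n := Nat.pow_pos (by decide)
      simp only [stackMeasure, List.map_cons, List.sum_cons] at hm
      omega
  | succ fuel ih =>
    intro stack total hm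
    cases stack with
    | nil => rfl
    | cons p rest =>
      obtain ⟨b, d⟩ := p
      have h3 : 0 < 3 ^ countCells b n := Nat.pow_pos (by decide)
      simp only [stackMeasure, List.map_cons, List.sum_cons] at hm
      cases hfl : freeList b n with
      | nil =>
        have hc : countCells b n = 0 := by rw [← freeLen_eq_count, hfl]; rfl
        have hmeas : stackMeasure n rest ≤ fuel := by
          simp only [stackMeasure]; omega
        rw [stack_step_nil fuel d rest total hfl, ih rest _ hmeas,
          List.foldl_cons, rookPolyAux_count0 hc]
      | cons q t =>
        cases t with
        | nil =>
          have hc : countCells b n = 1 := by rw [← freeLen_eq_count, hfl]; rfl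
          have hmeas : stackMeasure n rest ≤ fuel := by
            simp only [stackMeasure]; omega
          rw [stack_step_one fuel d rest total hfl, ih rest _ hmeas,
            List.foldl_cons, hc, rookPolyAux_count1 hc]
        | cons q2 t2 =>
          obtain ⟨r, c⟩ := q
          obtain ⟨hfree, hr, hc⟩ := mem_freeList (p := (r, c)) (by rw [hfl]; exact List.mem_cons_self ..)
          have hK2 : 2 ≤ countCells b n := by rw [← freeLen_eq_count, hfl]; simp
          have hfind : findFirst b n = some (r, c) := by rw [findFirst_eq_head, hfl]; rfl
          have hc1 : countCells (forbidCell b n r c) n < countCells b n :=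
            count_forbidCell hfree hr hc
          have hc2 : countCells (forbidRowCol b n r c) n < countCells b n :=
            count_forbidRowCol hfree hr hc
          have epow : 3 ^ countCells (forbidCell b n r c) n + 3 ^ countCells (forbidRowCol b n r c) n
              < 3 ^ countCells b n := by
            have e1 : 3 ^ countCells (forbidCell b n r c) n ≤ 3 ^ (countCells b n - 1) :=
              Nat.pow_le_pow_right (by decide) (by omega)
            have e2 : 3 ^ countCells (forbidRowCol b n r c) n ≤ 3 ^ (countCells b n - 1) :=
              Nat.pow_le_pow_right (by decide) (by omega)
            have e3 : 3 ^ countCells b n = 3 ^ (countCells b n - 1) * 3 := by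
              rw [← Nat.pow_succ]
              congr 1
              omega
            have e4 : 0 < 3 ^ (countCells b n - 1) := Nat.pow_pos (by decide)
            omega
          have hmeas : stackMeasure n (((forbidCell b n r c), d) :: ((forbidRowCol b n r c), d + 1) :: rest) ≤ fuel := by
            simp only [stackMeasure, List.map_cons, List.sum_cons]
            omega
          rw [stack_step_branch fuel d rest total hfl, ih _ total hmeas]
          simp only [List.foldl_cons]
          congr 1
          rw [vadd_assoc']
          congr 1
          rw [rep_succ_shift, vadd_shift]
          congr 1
          obtain ⟨K, hK⟩ : ∃ K, countCells b n = K + 1 := ⟨countCells b n - 1, by omega⟩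
          rw [hK, rookPolyAux_branch K (by omega) (by omega) hfind,
            delColAndRow_eq hr hc, delCell_eq hr hc, add2Vector_eq_vadd,
            rookPolyAux_congr K (countCells (forbidRowCol b n r c) n) (by omega) (le_refl _),
            rookPolyAux_congr K (countCells (forbidCell b n r c) n) (by omega) (le_refl _),
            vadd_comm (rookPolyAux (countCells (forbidCell b n r c) n) (forbidCell b n r c) n)
              (0 :: rookPolyAux (countCells (forbidRowCol b n r c) n) (forbidRowCol b n r c) n)]

-- ===== VERDICT (by name: the statement is the Claim_ definition above) =====
theorem rookPoly_spec : Claim_equal_rookPoly := by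
  intro board sizeMatrix _ _
  unfold Spec_rookPoly rookPoly rookPoly_alt
  rw [stack_eq sizeMatrix.toNat _ _ _ (by simp [stackMeasure, freeLen_eq_count])]
  simp [vadd_nil]
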